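-- pv_equiv track=rewrite | github.com/DancingOnAir/LeetcodePythonSolution | binary_search/2554_maximum_number_of_integers_to_choose_from_a_range_i.py | maxCount1
-- ===== SOURCE A (Python) =====
-- from typing import List
--
-- def maxCount1(banned: List[int], n: int, maxSum: int) -> int:
--     i = j = total = res = 0
--     banned.sort()
--     while i < n:
--         if i + 1 < banned[j] or (i + 1 > banned[j] and j == len(banned) - 1):
--             if total + i + 1 > maxSum:
--                 return res
--             total += i + 1
--             res += 1
--             i += 1
--         elif i + 1 == banned[j]:
--             i += 1
--             if j < len(banned) - 1:
--                 j += 1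
--         else:
--             if j < len(banned) - 1:
--                 j += 1
--     return res
-- ===== SOURCE B (Python) =====
-- def maxCount1(banned, n, maxSum):
--     # keep A's observable side effect: banned is sorted in place
--     banned.sort()
--     # distinct banned values that can actually matter
--     forb = {b for b in banned if 1 <= b <= n}
--     # S(x) = sum of the non-banned integers in [1..x]; it is nondecreasing in x.
--     # Binary-search the largest x in [0..n] with S(x) <= maxSum; the answer is
--     # the number of non-banned integers in [1..x].
--     lo, hi = 0, max(n, 0)
--     while lo < hi:
--         mid = (lo + hi + 1) // 2
--         used = mid * (mid + 1) // 2 - sum(b for b in forb if b <= mid)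
--         if used <= maxSum:
--             lo = mid
--         else:
--             hi = mid - 1
--     return lo - sum(1 for b in forb if b <= lo)
-- ===== Notes on version B (the rewrite author's own statement) =====
-- stated objective: alternative
-- what changed: A greedily scans 1..n one integer at a time with a two-pointer walk over the sorted banned list; B binary-searches the largest x with (sum of non-banned integers in [1..x]) <= maxSum, computing that sum in closed form as x*(x+1)//2 minus the sum of the distinct in-range banned values <= x, and returns x minus the count of banned values <= x.
import Mathlib
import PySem

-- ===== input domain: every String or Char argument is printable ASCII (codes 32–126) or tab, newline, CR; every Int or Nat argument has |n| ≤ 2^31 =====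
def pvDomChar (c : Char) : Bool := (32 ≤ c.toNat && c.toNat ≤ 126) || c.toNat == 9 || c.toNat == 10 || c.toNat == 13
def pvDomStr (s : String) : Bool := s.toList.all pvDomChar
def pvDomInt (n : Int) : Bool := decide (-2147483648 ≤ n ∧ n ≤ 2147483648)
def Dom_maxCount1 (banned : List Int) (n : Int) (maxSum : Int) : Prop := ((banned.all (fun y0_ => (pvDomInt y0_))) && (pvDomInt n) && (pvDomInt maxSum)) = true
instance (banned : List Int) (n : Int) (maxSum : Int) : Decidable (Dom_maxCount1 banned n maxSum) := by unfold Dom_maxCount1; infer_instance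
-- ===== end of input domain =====

-- B replaces A's one-at-a-time greedy scan (two-pointer walk over the sorted banned list)
-- by a binary search over the closed-form prefix sum x*(x+1)//2 minus the banned sum;
-- equivalence is about the return value (both sort `banned` in place in Python).


-- ===== PORT A =====
-- A's while-loop; the fuel argument only makes the recursion structural (it is chosen
-- large enough never to run out: each iteration decreases (n-i).toNat + (len-j)).
def maxCount1LoopA (sb : List Int) (n maxSum : Int) : Nat → Int → Nat → Int → Int → Int
  | 0, _, _, _, res => res
  | fuel+1, i, j, total, res =>
    if i < n then
      match PySem.List.pyGet? sb (j : Int) with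
      | none => 0  -- Python raises IndexError here (banned == [] and n > 0); excluded by Pre_
      | some bj =>
        if i + 1 < bj ∨ (i + 1 > bj ∧ j = sb.length - 1) then
          if total + i + 1 > maxSum then res
          else maxCount1LoopA sb n maxSum fuel (i+1) j (total + i + 1) (res + 1)
        else if i + 1 = bj then
          if j < sb.length - 1 then maxCount1LoopA sb n maxSum fuel (i+1) (j+1) total res
          else maxCount1LoopA sb n maxSum fuel (i+1) j total res
        else
          if j < sb.length - 1 then maxCount1LoopA sb n maxSum fuel i (j+1) total res
          else res  -- unreachable state (would be an infinite loop in Python)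
    else res

def maxCount1 (banned : List Int) (n : Int) (maxSum : Int) : Int :=
  let sb := PySem.List.sorted banned (fun x => x) false
  maxCount1LoopA sb n maxSum (n.toNat + sb.length + 1) 0 0 0 0

-- ===== PORT B =====
-- B's binary-search loop; fuel only makes the recursion structural (hi-lo shrinks each step).
def maxCount1AltSearch (forb : List Int) (maxSum : Int) : Nat → Int → Int → Int
  | 0, lo, _ => lo
  | fuel+1, lo, hi =>
    if lo < hi then
      let mid := PySem.Int.floordiv (lo + hi + 1) 2
      let used := PySem.Int.floordiv (mid * (mid + 1)) 2 - (forb.filter (fun b => b ≤ mid)).sum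
      if used ≤ maxSum then maxCount1AltSearch forb maxSum fuel mid hi
      else maxCount1AltSearch forb maxSum fuel lo (mid - 1)
    else lo

def maxCount1_alt (banned : List Int) (n : Int) (maxSum : Int) : Int :=
  let forb : PySem.Set Int := PySem.Set.ofList (banned.filter (fun b => decide (1 ≤ b ∧ b ≤ n)))
  let lo := maxCount1AltSearch forb maxSum ((max n 0).toNat + 1) 0 (max n 0)
  lo - ((forb.filter (fun b => b ≤ lo)).map (fun _ => (1 : Int))).sum

-- ===== PRECONDITION & SPEC =====
-- Pre_ excludes exactly the inputs where A raises IndexError: banned == [] with n > 0.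
def Pre_maxCount1 (banned : List Int) (n : Int) (maxSum : Int) : Prop := banned ≠ [] ∨ n ≤ 0
instance (banned : List Int) (n : Int) (maxSum : Int) : Decidable (Pre_maxCount1 banned n maxSum) := by unfold Pre_maxCount1; infer_instance
def pvWitness_maxCount1 : List Int × Int × Int := ([2, 3, 5], 7, 11)

def Spec_maxCount1 (banned : List Int) (n : Int) (maxSum : Int) (out : Int) : Prop := out = maxCount1_alt banned n maxSum
instance (banned : List Int) (n : Int) (maxSum : Int) (out : Int) : Decidable (Spec_maxCount1 banned n maxSum out) := by unfold Spec_maxCount1; infer_instance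

-- ===== CLAIM (what is proved, stated in full; the proofs are below) =====
def Claim_equal_maxCount1 : Prop := ∀ (banned : List Int) (n : Int) (maxSum : Int), Dom_maxCount1 banned n maxSum → Pre_maxCount1 banned n maxSum → Spec_maxCount1 banned n maxSum (maxCount1 banned n maxSum)

-- ===== LEMMAS AND PROOFS =====

def pvFree (banned : List Int) (x : Nat) : List Int :=
  (PySem.List.pyRange 1 ((x:Int)+1) 1).filter (fun v => decide (v ∉ banned))
def pvS (banned : List Int) (x : Nat) : Int := (pvFree banned x).sum
def pvC (banned : List Int) (x : Nat) : Nat := (pvFree banned x).length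
def pvBest (banned : List Int) (maxSum : Int) (N : Nat) : Nat :=
  Nat.findGreatest (fun x => pvS banned x ≤ maxSum) N
def pvForb (banned : List Int) (n : Int) : List Int :=
  PySem.Set.ofList (banned.filter (fun b => decide (1 ≤ b ∧ b ≤ n)))

theorem pvFree_succ (b : List Int) (x : Nat) :
    pvFree b (x+1) = pvFree b x ++ (if ((x:Int)+1) ∈ b then [] else [(x:Int)+1]) := by
  unfold pvFree
  have h : ((x:Int)+1)+1 = (((x+1):Nat):Int)+1 := by push_cast; ring
  rw [← h, PySem.List.pyRange_one_succ_right (by omega : (1:Int) ≤ (x:Int)+1), List.filter_append]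
  simp only [List.filter_cons, List.filter_nil]
  split_ifs with h1 h2 <;> simp_all

theorem pvS_succ (b : List Int) (x : Nat) :
    pvS b (x+1) = pvS b x + (if ((x:Int)+1) ∈ b then 0 else ((x:Int)+1)) := by
  unfold pvS; rw [pvFree_succ, List.sum_append]; split_ifs <;> simp

theorem pvC_succ (b : List Int) (x : Nat) :
    pvC b (x+1) = pvC b x + (if ((x:Int)+1) ∈ b then 0 else 1) := by
  unfold pvC; rw [pvFree_succ, List.length_append]; split_ifs <;> simp

theorem pvS_zero (b : List Int) : pvS b 0 = 0 := by simp [pvS, pvFree]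
theorem pvC_zero (b : List Int) : pvC b 0 = 0 := by simp [pvC, pvFree]

theorem pvS_mono (b : List Int) {x y : Nat} (h : x ≤ y) : pvS b x ≤ pvS b y := by
  induction y with
  | zero => have hx : x = 0 := by omega
            subst hx; exact le_refl _
  | succ y ih =>
    rcases Nat.lt_or_ge x (y+1) with hlt | hge
    · have := ih (by omega)
      rw [pvS_succ]; split_ifs <;> omega
    · have : x = y + 1 := by omega
      subst this; rfl

theorem pvC_zero_S (b : List Int) (x : Nat) (h : pvC b x = 0) : pvS b x = 0 := by
  have : pvFree b x = [] := List.length_eq_zero_iff.mp h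
  simp [pvS, this]

theorem pvFilterSumSucc (c : Int) : ∀ (l : List Int), l.Nodup →
    (l.filter (fun v => decide (v ≤ c+1))).sum =
      (l.filter (fun v => decide (v ≤ c))).sum + (if (c+1) ∈ l then c+1 else 0) := by
  intro l
  induction l with
  | nil => simp
  | cons a t ih =>
    intro hnd
    have hndt : t.Nodup := (List.nodup_cons.mp hnd).2
    have hna : a ∉ t := (List.nodup_cons.mp hnd).1
    have iht := ih hndt
    simp only [List.filter_cons, List.mem_cons, decide_eq_true_eq]
    by_cases hac : a = c+1
    · subst hac
      rw [if_pos (by omega), if_neg (by omega), if_pos (by tauto)]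
      rw [if_neg hna] at iht
      simp only [List.sum_cons]; omega
    · have hgoalmem : (c + 1 = a ∨ c + 1 ∈ t) ↔ (c+1) ∈ t := by
        constructor
        · rintro (h | h)
          · exact absurd h.symm hac
          · exact h
        · exact Or.inr
      by_cases hle : a ≤ c
      · rw [if_pos (by omega), if_pos hle]
        by_cases hm : (c+1) ∈ t
        · rw [if_pos (hgoalmem.mpr hm)]; rw [if_pos hm] at iht
          simp only [List.sum_cons]; omega
        · rw [if_neg (fun h => hm (hgoalmem.mp h))]; rw [if_neg hm] at iht
          simp only [List.sum_cons]; omega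
      · rw [if_neg (by omega), if_neg hle]
        by_cases hm : (c+1) ∈ t
        · rw [if_pos (hgoalmem.mpr hm)]; rw [if_pos hm] at iht; omega
        · rw [if_neg (fun h => hm (hgoalmem.mp h))]; rw [if_neg hm] at iht; omega

theorem pvFilterLenSucc (c : Int) : ∀ (l : List Int), l.Nodup →
    ((l.filter (fun v => decide (v ≤ c+1))).length : Int) =
      ((l.filter (fun v => decide (v ≤ c))).length : Int) + (if (c+1) ∈ l then 1 else 0) := by
  intro l
  induction l with
  | nil => simp
  | cons a t ih =>
    intro hnd
    have hndt : t.Nodup := (List.nodup_cons.mp hnd).2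
    have hna : a ∉ t := (List.nodup_cons.mp hnd).1
    have iht := ih hndt
    simp only [List.filter_cons, List.mem_cons, decide_eq_true_eq]
    by_cases hac : a = c+1
    · subst hac
      rw [if_pos (by omega), if_neg (by omega), if_pos (by tauto)]
      rw [if_neg hna] at iht
      simp only [List.length_cons]; push_cast; omega
    · have hgoalmem : (c + 1 = a ∨ c + 1 ∈ t) ↔ (c+1) ∈ t := by
        constructor
        · rintro (h | h)
          · exact absurd h.symm hac
          · exact h
        · exact Or.inr
      by_cases hle : a ≤ c
      · rw [if_pos (by omega), if_pos hle]
        by_cases hm : (c+1) ∈ t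
        · rw [if_pos (hgoalmem.mpr hm)]; rw [if_pos hm] at iht
          simp only [List.length_cons]; push_cast; omega
        · rw [if_neg (fun h => hm (hgoalmem.mp h))]; rw [if_neg hm] at iht
          simp only [List.length_cons]; push_cast; omega
      · rw [if_neg (by omega), if_neg hle]
        by_cases hm : (c+1) ∈ t
        · rw [if_pos (hgoalmem.mpr hm)]; rw [if_pos hm] at iht; omega
        · rw [if_neg (fun h => hm (hgoalmem.mp h))]; rw [if_neg hm] at iht; omega

theorem pvFloordivTwo {t a : Int} (h : 2 * t = a) : PySem.Int.floordiv a 2 = t := by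
  rw [PySem.Int.floordiv_eq_ediv_of_pos (by norm_num)]
  omega

theorem pvSumMapOne {α : Type} (l : List α) : ((l.map (fun _ => (1:Int))).sum) = (l.length : Int) := by
  induction l with
  | nil => simp
  | cons a t ih => simp only [List.map_cons, List.sum_cons, List.length_cons, ih]; push_cast; omega

theorem pvMem_forb (banned : List Int) (n v : Int) :
    v ∈ pvForb banned n ↔ v ∈ banned ∧ 1 ≤ v ∧ v ≤ n := by
  unfold pvForb
  rw [PySem.Set.mem_ofList, List.mem_filter]
  simp

theorem pvNodup_forb (banned : List Int) (n : Int) : (pvForb banned n).Nodup :=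
  PySem.Set.nodup_ofList _

theorem pvForbSum (banned : List Int) (n : Int) :
    ∀ x : Nat, (x:Int) ≤ n →
      2 * (((pvForb banned n).filter (fun v => decide (v ≤ (x:Int)))).sum + pvS banned x) =
        (x:Int) * ((x:Int)+1) := by
  intro x
  induction x with
  | zero =>
    intro _
    have he : (pvForb banned n).filter (fun v => decide (v ≤ ((0:Nat):Int))) = [] := by
      rw [List.filter_eq_nil_iff]
      intro v hv
      have := (pvMem_forb banned n v).mp hv
      simp only [decide_eq_true_eq, Nat.cast_zero]
      omega
    rw [he, pvS_zero]
    simp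
  | succ x ih =>
    intro hle
    have hxle : (x:Int) ≤ n := by push_cast at hle ⊢; omega
    have ihx := ih hxle
    have hcast : ((x+1:Nat):Int) = (x:Int)+1 := by push_cast; ring
    rw [hcast, pvFilterSumSucc (x:Int) _ (pvNodup_forb banned n), pvS_succ]
    by_cases hm : ((x:Int)+1) ∈ banned
    · rw [if_pos ((pvMem_forb banned n _).mpr ⟨hm, by omega, by push_cast at hle; omega⟩), if_pos hm]
      linear_combination ihx
    · rw [if_neg (fun h => hm ((pvMem_forb banned n _).mp h).1), if_neg hm]
      linear_combination ihx

theorem pvForbCnt (banned : List Int) (n : Int) :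
    ∀ x : Nat, (x:Int) ≤ n →
      (((pvForb banned n).filter (fun v => decide (v ≤ (x:Int)))).length : Int) + (pvC banned x : Int) =
        (x:Int) := by
  intro x
  induction x with
  | zero =>
    intro _
    have he : (pvForb banned n).filter (fun v => decide (v ≤ ((0:Nat):Int))) = [] := by
      rw [List.filter_eq_nil_iff]
      intro v hv
      have := (pvMem_forb banned n v).mp hv
      simp only [decide_eq_true_eq, Nat.cast_zero]
      omega
    rw [he, pvC_zero]
    simp
  | succ x ih =>
    intro hle
    have hxle : (x:Int) ≤ n := by push_cast at hle ⊢; omega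
    have ihx := ih hxle
    have hcast : ((x+1:Nat):Int) = (x:Int)+1 := by push_cast; ring
    rw [hcast, pvFilterLenSucc (x:Int) _ (pvNodup_forb banned n), pvC_succ]
    by_cases hm : ((x:Int)+1) ∈ banned
    · rw [if_pos ((pvMem_forb banned n _).mpr ⟨hm, by omega, by push_cast at hle; omega⟩), if_pos hm]
      push_cast
      omega
    · rw [if_neg (fun h => hm ((pvMem_forb banned n _).mp h).1), if_neg hm]
      push_cast
      omega

theorem pvUsedEq (banned : List Int) (n : Int) (m : Int) (h0 : 0 ≤ m) (hn : m ≤ n) :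
    PySem.Int.floordiv (m * (m+1)) 2 - ((pvForb banned n).filter (fun v => decide (v ≤ m))).sum =
      pvS banned m.toNat := by
  have hc : ((m.toNat : Nat) : Int) = m := Int.toNat_of_nonneg h0
  have := pvForbSum banned n m.toNat (by rw [hc]; exact hn)
  rw [hc] at this
  rw [pvFloordivTwo this]
  ring


theorem pvBest_le (b : List Int) (maxSum : Int) (N : Nat) : pvBest b maxSum N ≤ N :=
  Nat.findGreatest_le _

theorem pvBest_ge (b : List Int) (maxSum : Int) (N m : Nat) (hm : m ≤ N)
    (h : pvS b m ≤ maxSum) : m ≤ pvBest b maxSum N := by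
  unfold pvBest
  exact Nat.le_findGreatest hm h

theorem pvBest_sat (b : List Int) (maxSum : Int) (N m : Nat) (hm : m ≤ N)
    (h : pvS b m ≤ maxSum) : pvS b (pvBest b maxSum N) ≤ maxSum := by
  unfold pvBest
  exact Nat.findGreatest_spec (P := fun x => pvS b x ≤ maxSum) hm h

theorem pvBest_zero (b : List Int) (maxSum : Int) (N : Nat)
    (h : ¬ pvS b 0 ≤ maxSum) : pvBest b maxSum N = 0 := by
  unfold pvBest
  apply Nat.findGreatest_eq_zero_iff.mpr
  intro m _ _ hPm
  exact h (le_trans (pvS_mono b (Nat.zero_le _)) hPm)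

-- ===== B-side: the binary search returns pvBest =====
theorem pvAltSearch_eq (banned : List Int) (n maxSum : Int) (hn : 0 < n) :
    ∀ (fuel : Nat) (lo hi : Int), (hi - lo).toNat < fuel → 0 ≤ lo → lo ≤ hi → hi ≤ n →
      (pvS banned lo.toNat ≤ maxSum ∨ lo = 0) →
      (∀ y : Nat, hi < (y:Int) → (y:Int) ≤ n → ¬ (pvS banned y ≤ maxSum)) →
      maxCount1AltSearch (pvForb banned n) maxSum fuel lo hi =
        ((pvBest banned maxSum n.toNat : Nat) : Int) := by
  intro fuel
  induction fuel with
  | zero => intro lo hi hf; omega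
  | succ fuel ih =>
    intro lo hi hf h0 hlh hhn hdisj hhigh
    rw [maxCount1AltSearch]
    by_cases hlt : lo < hi
    · rw [if_pos hlt]
      have hmid1 : lo < PySem.Int.floordiv (lo + hi + 1) 2 ∧ PySem.Int.floordiv (lo + hi + 1) 2 ≤ hi := by
        rw [PySem.Int.floordiv_eq_ediv_of_pos (by norm_num)]
        omega
      set mid := PySem.Int.floordiv (lo + hi + 1) 2 with hmiddef
      have hmid0 : 0 ≤ mid := by omega
      have hused : PySem.Int.floordiv (mid * (mid + 1)) 2 -
          ((pvForb banned n).filter (fun b => decide (b ≤ mid))).sum = pvS banned mid.toNat :=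
        pvUsedEq banned n mid hmid0 (by omega)
      by_cases hcase : PySem.Int.floordiv (mid * (mid + 1)) 2 -
          ((pvForb banned n).filter (fun b => decide (b ≤ mid))).sum ≤ maxSum
      · rw [if_pos hcase]
        exact ih mid hi (by omega) (by omega) (by omega) hhn
          (Or.inl (by rw [← hused]; exact hcase)) hhigh
      · rw [if_neg hcase]
        rw [hused] at hcase
        refine ih lo (mid - 1) (by omega) h0 ?_ (by omega) hdisj ?_
        · -- lo ≤ mid - 1
          omega
        · intro y hy hyn
          intro hPy
          apply hcase
          calc pvS banned mid.toNat ≤ pvS banned y := by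
                apply pvS_mono
                omega
               _ ≤ maxSum := hPy
    · rw [if_neg hlt]
      have heq : lo = hi := by omega
      rcases hdisj with hP | h0eq
      · have hloN : lo.toNat ≤ n.toNat := by omega
        have hge : lo.toNat ≤ pvBest banned maxSum n.toNat := pvBest_ge _ _ _ _ hloN hP
        have hle2 : pvBest banned maxSum n.toNat ≤ lo.toNat := by
          by_contra hgt
          have hbN : pvBest banned maxSum n.toNat ≤ n.toNat := pvBest_le _ _ _
          have hPb : pvS banned (pvBest banned maxSum n.toNat) ≤ maxSum :=
            pvBest_sat _ _ _ _ hloN hP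
          exact hhigh (pvBest banned maxSum n.toNat) (by omega) (by omega) hPb
        have hbe : pvBest banned maxSum n.toNat = lo.toNat := by omega
        rw [hbe]
        omega
      · subst h0eq
        by_cases hP0 : pvS banned 0 ≤ maxSum
        · have hle2 : pvBest banned maxSum n.toNat ≤ 0 := by
            by_contra hgt
            have hbN : pvBest banned maxSum n.toNat ≤ n.toNat := pvBest_le _ _ _
            have hPb : pvS banned (pvBest banned maxSum n.toNat) ≤ maxSum :=
              pvBest_sat _ _ _ 0 (Nat.zero_le _) hP0
            exact hhigh (pvBest banned maxSum n.toNat) (by omega) (by omega) hPb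
          have hbe : pvBest banned maxSum n.toNat = 0 := by omega
          rw [hbe]
          rfl
        · rw [pvBest_zero banned maxSum n.toNat hP0]
          rfl

-- ===== A-side: the greedy loop returns pvC pvBest =====
theorem pvSorted_mono {sb : List Int} (hs : sb.Pairwise (· ≤ ·)) {p q : Nat}
    (hpq : p ≤ q) (hq : q < sb.length) : sb[p]'(by omega) ≤ sb[q] := by
  rcases Nat.lt_or_ge p q with h | h
  · exact List.pairwise_iff_getElem.mp hs p q (by omega) hq h
  · have hpq2 : p = q := by omega
    subst hpq2; rfl

theorem pvNotMem1 {sb : List Int} (hs : sb.Pairwise (· ≤ ·)) {j : Nat} (hj : j < sb.length)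
    {i : Int} (hlow : ∀ k, k < j → ∀ (hk : k < sb.length), sb[k] ≤ i) (hhigh : i + 1 < sb[j]) :
    (i + 1) ∉ sb := by
  intro hmem
  rcases List.mem_iff_getElem.mp hmem with ⟨k, hk, hkv⟩
  rcases Nat.lt_or_ge k j with h | h
  · have := hlow k h hk
    omega
  · have h2 : sb[j] ≤ sb[k] := pvSorted_mono hs h hk
    omega

theorem pvNotMem2 {sb : List Int} (hs : sb.Pairwise (· ≤ ·)) {j : Nat} (hj : j < sb.length)
    {i : Int} (hlow : ∀ k, k < j → ∀ (hk : k < sb.length), sb[k] ≤ i) (hlast : j = sb.length - 1)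
    (hgt : sb[j] < i + 1) : (i + 1) ∉ sb := by
  intro hmem
  rcases List.mem_iff_getElem.mp hmem with ⟨k, hk, hkv⟩
  rcases Nat.lt_or_ge k j with h | h
  · have := hlow k h hk
    omega
  · have hkj : k = j := by omega
    subst hkj
    omega

theorem pvStop (banned : List Int) (n maxSum : Int) (xi : Nat) (hxiN : xi ≤ n.toNat)
    (hinv : pvC banned xi = 0 ∨ pvS banned xi ≤ maxSum)
    (hblock : ∀ y : Nat, xi < y → y ≤ n.toNat → ¬ pvS banned y ≤ maxSum) :
    pvC banned xi = pvC banned (pvBest banned maxSum n.toNat) := by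
  by_cases hP : pvS banned xi ≤ maxSum
  · have hge : xi ≤ pvBest banned maxSum n.toNat := pvBest_ge _ _ _ _ hxiN hP
    have hle2 : pvBest banned maxSum n.toNat ≤ xi := by
      by_contra hgt
      have hbN : pvBest banned maxSum n.toNat ≤ n.toNat := pvBest_le _ _ _
      have hPb : pvS banned (pvBest banned maxSum n.toNat) ≤ maxSum :=
        pvBest_sat _ _ _ _ hxiN hP
      exact hblock (pvBest banned maxSum n.toNat) (by omega) (by omega) hPb
    have hbe : pvBest banned maxSum n.toNat = xi := by omega
    rw [hbe]
  · rcases hinv with hC0 | hS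
    · have hS0 : pvS banned xi = 0 := pvC_zero_S banned xi hC0
      have hP0 : ¬ pvS banned 0 ≤ maxSum := by rw [pvS_zero]; omega
      rw [pvBest_zero banned maxSum n.toNat hP0, pvC_zero, hC0]
    · exact absurd hS hP

theorem pvLoopA_eq (banned : List Int) (n maxSum : Int) (sb : List Int)
    (hmem : ∀ v : Int, v ∈ sb ↔ v ∈ banned)
    (hsort : sb.Pairwise (· ≤ ·)) (hn : 0 < n) :
    ∀ (fuel : Nat), ∀ (xi j : Nat),
      (n.toNat - xi) + (sb.length - j) < fuel →
      (xi : Int) ≤ n →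
      j < sb.length →
      (∀ k, k < j → ∀ (hk : k < sb.length), sb[k] ≤ (xi : Int)) →
      (pvC banned xi = 0 ∨ pvS banned xi ≤ maxSum) →
      maxCount1LoopA sb n maxSum fuel (xi : Int) j (pvS banned xi) ((pvC banned xi : Nat) : Int) =
        ((pvC banned (pvBest banned maxSum n.toNat) : Nat) : Int) := by
  intro fuel
  induction fuel with
  | zero => intro xi j hf _ _ _ _; omega
  | succ fuel ih =>
    intro xi j hf hxn hj hlow hinv
    rw [maxCount1LoopA]
    by_cases hlt : (xi : Int) < n
    · rw [if_pos hlt]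
      rw [PySem.List.pyGet?_natCast sb j, List.getElem?_eq_getElem hj]
      simp only []
      by_cases hc1 : (xi : Int) + 1 < sb[j] ∨ ((xi : Int) + 1 > sb[j] ∧ j = sb.length - 1)
      · rw [if_pos hc1]
        have hfree : ((xi : Int) + 1) ∉ banned := by
          rw [← hmem]
          rcases hc1 with h | ⟨h1, h2⟩
          · exact pvNotMem1 hsort hj hlow h
          · exact pvNotMem2 hsort hj hlow h2 h1
        have hSsucc : pvS banned (xi + 1) = pvS banned xi + ((xi : Int) + 1) := by
          rw [pvS_succ, if_neg hfree]
        have hCsucc : pvC banned (xi + 1) = pvC banned xi + 1 := by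
          rw [pvC_succ, if_neg hfree]
        by_cases hov : pvS banned xi + (xi : Int) + 1 > maxSum
        · rw [if_pos hov]
          have hstop := pvStop banned n maxSum xi (by omega)
            hinv (by
              intro y hy hyN hPy
              have : pvS banned (xi + 1) ≤ pvS banned y := pvS_mono banned (by omega)
              omega)
          rw [hstop]
        · rw [if_neg hov]
          have e1 : (xi : Int) + 1 = ((xi + 1 : Nat) : Int) := by push_cast; ring
          have e2 : pvS banned xi + (xi : Int) + 1 = pvS banned (xi + 1) := by omega
          have e3 : ((pvC banned xi : Nat) : Int) + 1 = ((pvC banned (xi + 1) : Nat) : Int) := by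
            rw [hCsucc]; push_cast; ring
          rw [e2, e3, e1]
          exact ih (xi + 1) j (by omega) (by push_cast; omega) hj
            (fun k h1 h2 => by have := hlow k h1 h2; push_cast; omega)
            (Or.inr (by omega))
      · rw [if_neg hc1]
        by_cases hc2 : (xi : Int) + 1 = sb[j]
        · rw [if_pos hc2]
          have hbmem : ((xi : Int) + 1) ∈ banned := by
            rw [← hmem, hc2]
            exact List.getElem_mem hj
          have hSsucc : pvS banned (xi + 1) = pvS banned xi := by
            rw [pvS_succ, if_pos hbmem]; ring
          have hCsucc : pvC banned (xi + 1) = pvC banned xi := by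
            rw [pvC_succ, if_pos hbmem]
            omega
          have e1 : (xi : Int) + 1 = ((xi + 1 : Nat) : Int) := by push_cast; ring
          rw [← hSsucc, ← hCsucc, e1]
          by_cases hjl : j < sb.length - 1
          · rw [if_pos hjl]
            exact ih (xi + 1) (j + 1) (by omega) (by push_cast; omega) (by omega)
              (fun k h1 h2 => by
                rcases Nat.lt_or_ge k j with h | h
                · have := hlow k h h2; push_cast; omega
                · have hkj : k = j := by omega
                  subst hkj
                  push_cast; omega)
              (by rw [hSsucc, hCsucc]; exact hinv)
          · rw [if_neg hjl]
            exact ih (xi + 1) j (by omega) (by push_cast; omega) hj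
              (fun k h1 h2 => by have := hlow k h1 h2; push_cast; omega)
              (by rw [hSsucc, hCsucc]; exact hinv)
        · rw [if_neg hc2]
          have hgt : sb[j] < (xi : Int) + 1 := by
            rcases not_or.mp hc1 with ⟨h1, _⟩
            omega
          have hjne : j ≠ sb.length - 1 := by
            rcases not_or.mp hc1 with ⟨_, h2⟩
            intro hje
            exact (not_and.mp h2) (by omega) hje
          rw [if_pos (show j < sb.length - 1 by omega)]
          exact ih xi (j + 1) (by omega) hxn (by omega)
            (fun k h1 h2 => by
              rcases Nat.lt_or_ge k j with h | h
              · exact hlow k h h2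
              · have hkj : k = j := by omega
                subst hkj
                omega)
            hinv
    · rw [if_neg hlt]
      have hxiN : xi = n.toNat := by omega
      have hstop := pvStop banned n maxSum xi (by omega) hinv
        (by intro y hy hyN; omega)
      rw [hstop]

-- ===== VERDICT (by name: the statement is the Claim_ definition above) =====
theorem maxCount1_spec : Claim_equal_maxCount1 := by
  unfold Claim_equal_maxCount1
  intro banned n maxSum _ hpre
  unfold Spec_maxCount1
  simp only [maxCount1, maxCount1_alt]
  by_cases hn : 0 < n
  · have hbne : banned ≠ [] := by
      rcases hpre with h | h
      · exact h
      · omega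
    set sb := PySem.List.sorted banned (fun x => x) false with hsb
    have hmem : ∀ v : Int, v ∈ sb ↔ v ∈ banned :=
      fun v => PySem.List.mem_sorted banned _ false v
    have hsort : sb.Pairwise (· ≤ ·) := by
      have := PySem.List.sorted_pairwise banned (fun x => x)
      simpa using this
    have hsbne : sb ≠ [] := by
      rw [hsb, Ne, PySem.List.sorted_eq_nil_iff]
      exact hbne
    have hlen : 0 < sb.length := List.length_pos_iff.mpr hsbne
    have hA := pvLoopA_eq banned n maxSum sb hmem hsort hn
      (n.toNat + sb.length + 1) 0 0 (by omega) (by omega) hlen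
      (fun k h1 _ => absurd h1 (Nat.not_lt_zero k)) (Or.inl (pvC_zero banned))
    simp only [pvS_zero, pvC_zero, Nat.cast_zero] at hA
    rw [hA]
    have hmax : max n 0 = n := by omega
    rw [hmax]
    have hB := pvAltSearch_eq banned n maxSum hn (n.toNat + 1) 0 n
      (by omega) (by omega) (by omega) (by omega) (Or.inr rfl)
      (by intro y h1 h2; omega)
    rw [show PySem.Set.ofList (banned.filter (fun b => decide (1 ≤ b ∧ b ≤ n))) = pvForb banned n from rfl]
    rw [hB, pvSumMapOne]
    have hcnt := pvForbCnt banned n (pvBest banned maxSum n.toNat)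
      (by
        have := pvBest_le banned maxSum n.toNat
        omega)
    omega
  · have hmax : max n 0 = 0 := by omega
    rw [hmax]
    rw [maxCount1LoopA, maxCount1AltSearch]
    rw [if_neg (by omega : ¬ (0:Int) < n), if_neg (by omega : ¬ (0:Int) < 0)]
    have hfe : banned.filter (fun b => decide (1 ≤ b ∧ b ≤ n)) = [] := by
      rw [List.filter_eq_nil_iff]
      intro v _
      simp only [decide_eq_true_eq]
      omega
    rw [hfe]
    simp [PySem.Set.ofList]
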